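-- pv_equiv track=rewrite | github.com/sethc5/modframe | modframe/scripts/validate_metadata.py | has_list_block
-- ===== SOURCE A (Python) =====
-- def has_list_block(text: str, key: str) -> bool:
--     lines = text.splitlines()
--     for i, line in enumerate(lines):
--         if line.strip() == f"{key}:":
--             for nxt in lines[i + 1 : i + 8]:
--                 if not nxt.strip():
--                     continue
--                 return nxt.lstrip().startswith("-")
--     return False
-- ===== SOURCE B (Python) =====
-- def has_list_block(text: str, key: str) -> bool:
--     target = f"{key}:"
--     remaining = 0
--     for line in text.splitlines():
--         if remaining > 0:
--             if line.strip():
--                 return line.lstrip().startswith("-")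
--             remaining -= 1
--         if line.strip() == target and remaining == 0:
--             remaining = 7
--     return False
-- ===== Notes on version B (the rewrite author's own statement) =====
-- stated objective: alternative
-- what changed: Replaced the nested enumerate+slice window scan with a single linear pass that keeps an integer countdown 'remaining' for the 7-line inspection window, so no line is visited twice and no slices are built.
import Mathlib
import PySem

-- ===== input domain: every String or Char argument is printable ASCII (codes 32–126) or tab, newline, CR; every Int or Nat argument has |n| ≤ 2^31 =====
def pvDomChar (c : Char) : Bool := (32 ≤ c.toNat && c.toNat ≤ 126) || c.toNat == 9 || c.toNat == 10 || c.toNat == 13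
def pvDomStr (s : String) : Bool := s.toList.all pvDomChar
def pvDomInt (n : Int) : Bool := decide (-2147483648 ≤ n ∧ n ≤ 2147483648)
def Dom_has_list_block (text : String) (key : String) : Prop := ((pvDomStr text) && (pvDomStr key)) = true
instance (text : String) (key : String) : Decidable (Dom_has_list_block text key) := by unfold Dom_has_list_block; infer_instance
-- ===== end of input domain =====

-- B replaces A's nested window slices by a single pass with a countdown counter; return value only, no side effects.

-- ===== PORT A =====
-- inner 'for nxt in lines[i+1:i+8]': some b = the function returns b, none = fall through to the outer loop
def pvInnerA (window : List String) : Option Bool :=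
  match window with
  | [] => none
  | nxt :: rest =>
    if PySem.Str.strip nxt = "" then pvInnerA rest
    else some (PySem.Str.startswith (PySem.Str.lstrip nxt) "-")

-- outer 'for i, line in enumerate(lines)'
def pvOuterA (lines : List String) (key : String) (i : Nat) : Bool :=
  if h : i < lines.length then
    (if PySem.Str.strip lines[i] = key ++ ":" then
      match pvInnerA (PySem.List.slice lines (some ((i : Int) + 1)) (some ((i : Int) + 8))) with
      | some b => b
      | none => pvOuterA lines key (i + 1)
    else pvOuterA lines key (i + 1))
  else false
termination_by lines.length - i

def has_list_block (text : String) (key : String) : Bool :=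
  pvOuterA (PySem.Str.splitlines text) key 0

-- ===== PORT B =====
-- single pass; 'remaining' is the countdown of the 7-line inspection window (0 = not inside a window)
def pvLoopB (target : String) : List String → Nat → Bool
  | [], _ => false
  | line :: rest, remaining =>
    if remaining > 0 then
      if PySem.Str.strip line ≠ "" then
        PySem.Str.startswith (PySem.Str.lstrip line) "-"
      else
        pvLoopB target rest
          (if PySem.Str.strip line = target ∧ remaining - 1 = 0 then 7 else remaining - 1)
    else
      pvLoopB target rest (if PySem.Str.strip line = target then 7 else 0)

def has_list_block_alt (text : String) (key : String) : Bool :=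
  pvLoopB (key ++ ":") (PySem.Str.splitlines text) 0

-- ===== PRECONDITION & SPEC =====
def Spec_has_list_block (text : String) (key : String) (out : Bool) : Prop := out = has_list_block_alt text key
instance (text : String) (key : String) (out : Bool) : Decidable (Spec_has_list_block text key out) := by unfold Spec_has_list_block; infer_instance

-- ===== CLAIM (what is proved, stated in full; the proofs are below) =====
def Claim_equal_has_list_block : Prop := ∀ (text : String) (key : String), Dom_has_list_block text key → Spec_has_list_block text key (has_list_block text key)

-- ===== LEMMAS AND PROOFS =====

theorem target_ne_empty (key : String) : key ++ ":" ≠ "" := by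
  intro h
  have := congrArg String.length h
  simp at this

-- pvInnerA returns none exactly when every line of the window is blank
theorem pvInnerA_none_blank {w : List String} (h : pvInnerA w = none) :
    ∀ x ∈ w, PySem.Str.strip x = "" := by
  induction w with
  | nil => intro x hx; cases hx
  | cons a rest ih =>
    intro x hx
    rw [pvInnerA] at h
    by_cases ha : PySem.Str.strip a = ""
    · rw [if_pos ha] at h
      rcases List.mem_cons.mp hx with rfl | hx
      · exact ha
      · exact ih h x hx
    · rw [if_neg ha] at h
      exact absurd h (by simp)

-- window lemma: pvLoopB inside a window of r pending lines equals A's inner scan over the next r lines,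
-- falling back to scanning mode after r blank lines
theorem pvLoopB_window (target : String) (htarget : target ≠ "") :
    ∀ (r : Nat) (s : List String),
      pvLoopB target s r =
        match pvInnerA (s.take r) with
        | some b => b
        | none => pvLoopB target (s.drop r) 0 := by
  intro r
  induction r with
  | zero => intro s; simp [pvInnerA]
  | succ r ih =>
    intro s
    cases s with
    | nil => simp [pvLoopB, pvInnerA]
    | cons line rest =>
      by_cases hb : PySem.Str.strip line = ""
      · rw [pvLoopB]
        simp only [List.take_succ_cons, List.drop_succ_cons]
        rw [pvInnerA]
        simp [hb, htarget, ih rest]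
      · rw [pvLoopB]
        simp only [List.take_succ_cons]
        rw [pvInnerA]
        simp [hb]

-- A skips a block of blank lines without effect
theorem pvOuterA_skip_blanks (lines : List String) (key : String) :
    ∀ (n i : Nat), (∀ x ∈ (lines.drop i).take n, PySem.Str.strip x = "") →
      pvOuterA lines key i = pvOuterA lines key (i + n) := by
  intro n
  induction n with
  | zero => intro i _; rfl
  | succ n ih =>
    intro i hall
    by_cases h : i < lines.length
    · have hdrop : lines.drop i = lines[i] :: lines.drop (i + 1) :=
        List.drop_eq_getElem_cons h
      have hblank : PySem.Str.strip lines[i] = "" := by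
        refine hall lines[i] ?_
        rw [hdrop, List.take_succ_cons]
        exact List.mem_cons_self ..
      have hne : ¬ (PySem.Str.strip lines[i] = key ++ ":") := by
        intro hc; exact target_ne_empty key (hc.symm.trans hblank)
      have hrest : ∀ x ∈ (lines.drop (i + 1)).take n, PySem.Str.strip x = "" := by
        intro x hx
        apply hall
        rw [hdrop]
        simp only [List.take_succ_cons]
        exact List.mem_cons_of_mem _ hx
      have harr : i + 1 + n = i + (n + 1) := by omega
      rw [pvOuterA, dif_pos h, if_neg hne, ih (i + 1) hrest, harr]
    · have h2 : ¬ i + (n + 1) < lines.length := fun hc => h (by omega)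
      rw [pvOuterA, dif_neg h, pvOuterA, dif_neg h2]

-- the slice lines[i+1:i+8] is the 7-line window after i
theorem slice_window (lines : List String) (i : Nat) :
    PySem.List.slice lines (some ((i : Int) + 1)) (some ((i : Int) + 8)) =
      (lines.drop (i + 1)).take 7 := by
  have h := PySem.List.slice_natCast_add lines (i + 1) 7
  have e2 : ((i + 1 : Nat) : Int) + ((7 : Nat) : Int) = (i : Int) + 8 := by push_cast; ring
  have e1 : ((i + 1 : Nat) : Int) = (i : Int) + 1 := by push_cast; ring
  rw [e2, e1] at h
  exact h

-- main invariant: B in scanning mode at suffix i equals A's outer loop at index i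
theorem main_invariant (lines : List String) (key : String) :
    ∀ (fuel i : Nat), lines.length - i ≤ fuel →
      pvLoopB (key ++ ":") (lines.drop i) 0 = pvOuterA lines key i := by
  intro fuel
  induction fuel with
  | zero =>
    intro i hle
    have h : ¬ i < lines.length := by omega
    have : lines.drop i = [] := List.drop_eq_nil_of_le (by omega)
    rw [this, pvLoopB, pvOuterA]
    simp [h]
  | succ fuel ih =>
    intro i hle
    by_cases h : i < lines.length
    · have hdrop : lines.drop i = lines[i] :: lines.drop (i + 1) :=
        List.drop_eq_getElem_cons h
      rw [hdrop, pvLoopB, pvOuterA]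
      simp only [h, dif_pos, gt_iff_lt, Nat.lt_irrefl, if_false]
      by_cases hk : PySem.Str.strip lines[i] = key ++ ":"
      · simp only [hk, if_pos]
        rw [pvLoopB_window (key ++ ":") (target_ne_empty key) 7 (lines.drop (i + 1))]
        rw [slice_window]
        cases hinner : pvInnerA ((lines.drop (i + 1)).take 7) with
        | some b => simp
        | none =>
          simp only
          have hblanks := pvInnerA_none_blank hinner
          rw [List.drop_drop]
          have h7 : i + 1 + 7 = i + 8 := by omega
          rw [h7, ih (i + 8) (by omega), pvOuterA_skip_blanks lines key 7 (i + 1) hblanks, h7]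
      · simp only [hk, if_false]
        rw [ih (i + 1) (by omega)]
    · have : lines.drop i = [] := List.drop_eq_nil_of_le (by omega)
      rw [this, pvLoopB, pvOuterA]
      simp [h]

-- ===== VERDICT (by name: the statement is the Claim_ definition above) =====
theorem has_list_block_spec : Claim_equal_has_list_block := by
  intro text key _
  unfold Spec_has_list_block has_list_block has_list_block_alt
  exact (main_invariant (PySem.Str.splitlines text) key (PySem.Str.splitlines text).length 0 (by omega)).symm
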